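-- pv_equiv track=rewrite | github.com/jmerizia/sql2py | src/sqlgood/parsing/parse_sqlite.py | tokenize_sql
-- ===== SOURCE A (Python) =====
-- from typing import Tuple, List, Union, NamedTuple, TypedDict, NamedTuple, Iterator, Optional
--
-- def tokenize_sql(text) -> Iterator[str]:
--     l = 0
--     r = 0
--     special_tokens = [
--         '<>', '<=', '>=', '=', '<', '>', '!=',
--         '(', ')', ';', '+', '-', '*', '/', '\'',
--         '.', ',', '?',
--     ]
--
--     while r < len(text):
--
--         # skip whitespace
--         while r < len(text) and text[r].isspace():
--             r += 1
--
--         # EOF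
--         if r >= len(text):
--             pass
--
--         # word token
--         elif text[r].isalpha() or text[r] == '_':
--             l = r
--             r += 1
--             while r < len(text) and (text[r].isalnum() or text[r] == '_'):
--                 r += 1
--             yield text[l:r]
--
--         # number token
--         elif text[r].isnumeric():
--             l = r
--             r += 1
--             while r < len(text) and text[r].isnumeric():
--                 r += 1
--             yield text[l:r]
--
--         # special token
--         elif any(text[r:].startswith(tok) for tok in special_tokens):
--             l = r
--             for tok in special_tokens:
--                 if text[r:].startswith(tok):
--                     r = l + len(tok)
--                     yield text[l:r]
--                     break
--
--         else:
--             raise ValueError(f'Invalid query: {text}\n  tokenize_sql() :: Invalid character \'{text[r]}\'')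
-- ===== SOURCE B (Python) =====
-- # Explicit character-indexed state machine (START/WORD/NUMBER + token-start marker),
-- # one char per step, maximal-munch operator peek; same ValueError on invalid chars.
-- def tokenize_sql(text):
--     n = len(text)
--     i = 0
--     start = 0
--     state = 'START'
--     two_char = ('<>', '<=', '>=', '!=')
--     one_char = "=<>();+-*/'.,?"
--     while i < n:
--         c = text[i]
--         if state == 'WORD':
--             if c.isalnum() or c == '_':
--                 i += 1
--             else:
--                 yield text[start:i]
--                 state = 'START'
--         elif state == 'NUMBER':
--             if c.isnumeric():
--                 i += 1
--             else:
--                 yield text[start:i]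
--                 state = 'START'
--         else:  # START
--             if c.isspace():
--                 i += 1
--             elif c.isalpha() or c == '_':
--                 state = 'WORD'
--                 start = i
--                 i += 1
--             elif c.isnumeric():
--                 state = 'NUMBER'
--                 start = i
--                 i += 1
--             elif text[i:i+2] in two_char:
--                 yield text[i:i+2]
--                 i += 2
--             elif c in one_char:
--                 yield c
--                 i += 1
--             else:
--                 raise ValueError(f'Invalid query: {text}\n  tokenize_sql() :: Invalid character \'{text[i]}\'')
--     if state != 'START':
--         yield text[start:n]
-- ===== Notes on version B (the rewrite author's own statement) =====
-- stated objective: alternative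
-- what changed: A's nested-loop scanner (outer loop with inner whitespace/word/number run loops, operators by first-match over an 18-token list) is replaced by an explicit character-indexed state machine (START/WORD/NUMBER with a token-start marker) that advances one character per step, flushes the pending token at end of input, and matches operators by a maximal-munch peek (the four two-char operators before the single-char ones).
import Mathlib
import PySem

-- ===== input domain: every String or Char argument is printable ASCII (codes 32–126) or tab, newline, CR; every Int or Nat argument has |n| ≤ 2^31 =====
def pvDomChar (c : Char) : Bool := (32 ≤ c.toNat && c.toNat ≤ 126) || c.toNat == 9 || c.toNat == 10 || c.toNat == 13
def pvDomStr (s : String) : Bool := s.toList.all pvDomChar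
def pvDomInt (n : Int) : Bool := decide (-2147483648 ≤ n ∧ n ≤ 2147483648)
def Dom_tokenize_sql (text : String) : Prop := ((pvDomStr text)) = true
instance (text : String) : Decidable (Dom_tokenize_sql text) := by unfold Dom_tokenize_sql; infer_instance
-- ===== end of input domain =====

-- B rewrites A's nested-run scanner as a one-char-per-step state machine (objective: alternative decomposition).
-- Both versions raise ValueError on exactly the same inputs; Pre_ excludes exactly those and nothing else
-- within Dom_. Python A is a generator; the equivalence is about the fully consumed sequence of yielded
-- tokens. 'isnumeric' is ported as Chars.isdigit: on the ASCII domain Dom_ the two predicates coincide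
-- (both hold exactly on '0'..'9'), so the port is exact on every admitted input.

-- ===== PORT A =====
def pvSpecials : List (List Char) :=
  [['<','>'], ['<','='], ['>','='], ['='], ['<'], ['>'], ['!','='],
   ['('], [')'], [';'], ['+'], ['-'], ['*'], ['/'], ['\''],
   ['.'], [','], ['?']]

-- inner 'while' loops of A (skip whitespace / word run / number run), as index recursion
def pvSkipWS (cs : List Char) (r : Nat) : Nat :=
  if h : r < cs.length then
    (if PySem.Chars.isspace cs[r] then pvSkipWS cs (r + 1) else r)
  else r
termination_by cs.length - r

def pvWordEnd (cs : List Char) (r : Nat) : Nat :=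
  if h : r < cs.length then
    (if PySem.Chars.isalnum cs[r] || (cs[r] == '_') then pvWordEnd cs (r + 1) else r)
  else r
termination_by cs.length - r

def pvNumEnd (cs : List Char) (r : Nat) : Nat :=
  if h : r < cs.length then
    (if PySem.Chars.isdigit cs[r] then pvNumEnd cs (r + 1) else r)
  else r
termination_by cs.length - r

theorem pvSkipWS_le (cs : List Char) (r : Nat) : r ≤ pvSkipWS cs r := by
  unfold pvSkipWS
  split
  · split
    · exact le_trans (Nat.le_succ r) (pvSkipWS_le cs (r + 1))
    · exact le_refl r
  · exact le_refl r
termination_by cs.length - r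

theorem pvWordEnd_le (cs : List Char) (r : Nat) : r ≤ pvWordEnd cs r := by
  unfold pvWordEnd
  split
  · split
    · exact le_trans (Nat.le_succ r) (pvWordEnd_le cs (r + 1))
    · exact le_refl r
  · exact le_refl r
termination_by cs.length - r

theorem pvNumEnd_le (cs : List Char) (r : Nat) : r ≤ pvNumEnd cs r := by
  unfold pvNumEnd
  split
  · split
    · exact le_trans (Nat.le_succ r) (pvNumEnd_le cs (r + 1))
    · exact le_refl r
  · exact le_refl r
termination_by cs.length - r

theorem pvSpecials_len_pos {tok : List Char}
    (h : tok ∈ pvSpecials) : 0 < tok.length := by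
  simp [pvSpecials] at h
  rcases h with h|h|h|h|h|h|h|h|h|h|h|h|h|h|h|h|h|h <;> subst h <;> decide

-- the outer 'while' of A; the final 'else' is Python's ValueError (excluded by Pre_)
def tokenize_sqlGo (cs : List Char) (r : Nat) : List String :=
  if hr : r < cs.length then
    let r1 := pvSkipWS cs r
    if h1 : r1 < cs.length then
      if PySem.Chars.isalpha cs[r1] || (cs[r1] == '_') then
        let r2 := pvWordEnd cs (r1 + 1)
        String.ofList (PySem.List.slice cs (some (r1 : Int)) (some (r2 : Int))) ::
          tokenize_sqlGo cs r2
      else if PySem.Chars.isdigit cs[r1] then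
        let r2 := pvNumEnd cs (r1 + 1)
        String.ofList (PySem.List.slice cs (some (r1 : Int)) (some (r2 : Int))) ::
          tokenize_sqlGo cs r2
      else if pvSpecials.any (fun tok => PySem.Chars.startswith (cs.drop r1) tok) then
        match hf : pvSpecials.find? (fun tok => PySem.Chars.startswith (cs.drop r1) tok) with
        | some tok =>
            String.ofList (PySem.List.slice cs (some (r1 : Int)) (some ((r1 + tok.length : Nat) : Int))) ::
              tokenize_sqlGo cs (r1 + tok.length)
        | none => []   -- unreachable: guarded by the 'any'
      else []          -- Python: raise ValueError (outside Pre_)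
    else []            -- EOF after the whitespace skip
  else []
termination_by cs.length - r
decreasing_by
  · have h1' : r ≤ pvSkipWS cs r := pvSkipWS_le cs r
    have := pvWordEnd_le cs (pvSkipWS cs r + 1)
    omega
  · have h1' : r ≤ pvSkipWS cs r := pvSkipWS_le cs r
    have := pvNumEnd_le cs (pvSkipWS cs r + 1)
    omega
  · have h1' : r ≤ pvSkipWS cs r := pvSkipWS_le cs r
    have := pvSpecials_len_pos (List.mem_of_find?_eq_some hf)
    omega

def tokenize_sql (text : String) : List String :=
  tokenize_sqlGo text.toList 0

-- ===== PORT B =====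
inductive PvState where
  | start | word | number
deriving DecidableEq, Repr

def pvTwoChar : List (List Char) := [['<','>'], ['<','='], ['>','='], ['!','=']]
def pvOneChar : List Char := ['=','<','>','(',')',';','+','-','*','/','\'','.',',','?']

def tokenize_sqlAltGo (cs : List Char) (i start : Nat) (st : PvState) : List String :=
  if h : i < cs.length then
    match st with
    | .word =>
      if PySem.Chars.isalnum cs[i] || (cs[i] == '_') then
        tokenize_sqlAltGo cs (i + 1) start .word
      else
        String.ofList (PySem.List.slice cs (some (start : Int)) (some (i : Int))) ::
          tokenize_sqlAltGo cs i start .start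
    | .number =>
      if PySem.Chars.isdigit cs[i] then
        tokenize_sqlAltGo cs (i + 1) start .number
      else
        String.ofList (PySem.List.slice cs (some (start : Int)) (some (i : Int))) ::
          tokenize_sqlAltGo cs i start .start
    | .start =>
      if PySem.Chars.isspace cs[i] then
        tokenize_sqlAltGo cs (i + 1) start .start
      else if PySem.Chars.isalpha cs[i] || (cs[i] == '_') then
        tokenize_sqlAltGo cs (i + 1) i .word
      else if PySem.Chars.isdigit cs[i] then
        tokenize_sqlAltGo cs (i + 1) i .number
      else if pvTwoChar.contains (PySem.List.slice cs (some (i : Int)) (some ((i + 2 : Nat) : Int))) then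
        String.ofList (PySem.List.slice cs (some (i : Int)) (some ((i + 2 : Nat) : Int))) ::
          tokenize_sqlAltGo cs (i + 2) start .start
      else if pvOneChar.contains cs[i] then
        String.ofList [cs[i]] :: tokenize_sqlAltGo cs (i + 1) start .start
      else []          -- Python: raise ValueError (outside Pre_)
  else
    match st with
    | .start => []
    | _ => [String.ofList (PySem.List.slice cs (some (start : Int)) (some (cs.length : Int)))]
termination_by (cs.length - i, (match st with | .start => 0 | _ => 1))
decreasing_by
  all_goals first
    | (apply Prod.Lex.left; omega)
    | (apply Prod.Lex.right; omega)

def tokenize_sql_alt (text : String) : List String :=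
  tokenize_sqlAltGo text.toList 0 0 .start

-- ===== PRECONDITION & SPEC =====
-- Pre_ excludes exactly the inputs on which Python A raises ValueError (a character that is not
-- whitespace / alphanumeric / '_' / a special-token character, or a lone '!' not followed by '=');
-- within the ASCII domain Dom_ it excludes no input on which A returns (on Dom_, isnumeric holds
-- exactly on the digits '0'..'9', so the isdigit test below is A's own character classification).
def pvOk : List Char → Bool
  | [] => true
  | c :: rest =>
    if PySem.Chars.isspace c || PySem.Chars.isalpha c || PySem.Chars.isdigit c
        || (c == '_') || pvOneChar.contains c then
      pvOk rest
    else if c == '!' then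
      match rest with
      | '=' :: _ => pvOk rest
      | _ => false
    else false


def Pre_tokenize_sql (text : String) : Prop := pvOk text.toList = true
instance (text : String) : Decidable (Pre_tokenize_sql text) := by
  unfold Pre_tokenize_sql; infer_instance

def pvWitness_tokenize_sql : String := "a <= 1;"

def Spec_tokenize_sql (text : String) (out : List String) : Prop := out = tokenize_sql_alt text
instance (text : String) (out : List String) : Decidable (Spec_tokenize_sql text out) := by
  unfold Spec_tokenize_sql; infer_instance

-- ===== CLAIM (what is proved, stated in full; the proofs are below) =====
def Claim_equal_tokenize_sql : Prop :=
  ∀ (text : String), Dom_tokenize_sql text → Pre_tokenize_sql text →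
    Spec_tokenize_sql text (tokenize_sql text)

-- ===== LEMMAS AND PROOFS =====

theorem spec_find (c : Char) (t : List Char) :
    pvSpecials.find? (fun tok => PySem.Chars.startswith (c :: t) tok) =
      (if pvTwoChar.contains ((c :: t).take 2) then some ((c :: t).take 2)
       else if pvOneChar.contains c then some [c] else none) := by
  rcases t with _ | ⟨c2, t⟩
  · rw [if_neg (by simp [pvTwoChar])]
    by_cases hB : pvOneChar.contains c = true
    · rw [if_pos hB]
      simp [pvOneChar] at hB
      rcases hB with h|h|h|h|h|h|h|h|h|h|h|h|h|h <;> subst h <;> rfl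
    · rw [if_neg hB]
      rw [List.find?_eq_none]
      intro tok htok
      simp [pvOneChar] at hB
      obtain ⟨b1,b2,b3,b4,b5,b6,b7,b8,b9,b10,b11,b12,b13,b14⟩ := hB
      fin_cases htok <;> simp only [PySem.Chars.startswith, List.isPrefixOf] <;> simp
      all_goals (intro h; exact absurd h.symm (by assumption))
  · by_cases hA : pvTwoChar.contains ((c :: c2 :: t).take 2) = true
    · rw [if_pos hA]
      simp [pvTwoChar] at hA
      rcases hA with ⟨h1,h2⟩|⟨h1,h2⟩|⟨h1,h2⟩|⟨h1,h2⟩ <;> subst h1 <;> subst h2 <;> rfl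
    · rw [if_neg hA]
      simp [pvTwoChar] at hA
      by_cases hB : pvOneChar.contains c = true
      · rw [if_pos hB]
        simp [pvOneChar] at hB
        rcases hB with h|h|h|h|h|h|h|h|h|h|h|h|h|h <;> subst h
        all_goals try rfl
        · have e1 : ('>' == c2) = false := beq_eq_false_iff_ne.mpr (Ne.symm (hA.1 rfl))
          have e2 : ('=' == c2) = false := beq_eq_false_iff_ne.mpr (Ne.symm (hA.2.1 rfl))
          simp [pvSpecials, List.find?, PySem.Chars.startswith, List.isPrefixOf, e1, e2]
        · have e2 : ('=' == c2) = false := beq_eq_false_iff_ne.mpr (Ne.symm (hA.2.2.1 rfl))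
          simp [pvSpecials, List.find?, PySem.Chars.startswith, List.isPrefixOf, e2]
      · rw [if_neg hB]
        rw [List.find?_eq_none]
        intro tok htok
        simp [pvOneChar] at hB
        obtain ⟨b1,b2,b3,b4,b5,b6,b7,b8,b9,b10,b11,b12,b13,b14⟩ := hB
        fin_cases htok <;> simp only [PySem.Chars.startswith, List.isPrefixOf] <;> simp
        all_goals (try (intro h; exact absurd h.symm (by assumption)))
        all_goals (intro h hp; exact absurd hp.symm (hA.2.2.2 h.symm))

theorem pvSkipWS_not_space (cs : List Char) (r : Nat) (h : pvSkipWS cs r < cs.length) :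
    PySem.Chars.isspace (cs[pvSkipWS cs r]'h) = false := by
  by_cases hr : r < cs.length
  · by_cases hs : PySem.Chars.isspace (cs[r]'hr) = true
    · have e : pvSkipWS cs r = pvSkipWS cs (r + 1) := by rw [pvSkipWS]; simp [hr, hs]
      simp only [e] at h ⊢
      exact pvSkipWS_not_space cs (r + 1) h
    · have e : pvSkipWS cs r = r := by rw [pvSkipWS]; simp [hr, hs]
      simp only [e] at h ⊢
      simpa using hs
  · have e : pvSkipWS cs r = r := by rw [pvSkipWS]; simp [hr]
    exact absurd (e ▸ h) hr
termination_by cs.length - r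

theorem pv_slice_clamp (cs : List Char) (s i : Nat) (hi : cs.length ≤ i) :
    PySem.List.slice cs (some (s : Int)) (some (i : Int)) =
      PySem.List.slice cs (some (s : Int)) (some ((cs.length : Nat) : Int)) := by
  rw [PySem.List.slice_natCast, PySem.List.slice_natCast]
  rw [List.take_of_length_le (by simp only [List.length_drop]; omega), List.take_of_length_le (by simp only [List.length_drop]; omega)]

theorem altGo_word (cs : List Char) (i start : Nat) :
    tokenize_sqlAltGo cs i start .word =
      String.ofList (PySem.List.slice cs (some (start : Int)) (some ((pvWordEnd cs i : Nat) : Int))) ::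
        tokenize_sqlAltGo cs (pvWordEnd cs i) start .start := by
  by_cases h : i < cs.length
  · by_cases hc : (PySem.Chars.isalnum (cs[i]'h) || (cs[i]'h == '_')) = true
    · have e : pvWordEnd cs i = pvWordEnd cs (i + 1) := by rw [pvWordEnd]; simp [h, hc]
      have eL : tokenize_sqlAltGo cs i start .word = tokenize_sqlAltGo cs (i + 1) start .word := by
        conv_lhs => rw [tokenize_sqlAltGo.eq_def]
        simp [h, hc]
      rw [eL, e]
      exact altGo_word cs (i + 1) start
    · have e : pvWordEnd cs i = i := by rw [pvWordEnd]; simp [h, hc]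
      rw [e]
      conv_lhs => rw [tokenize_sqlAltGo.eq_def]
      simp [h, hc]
  · have e : pvWordEnd cs i = i := by rw [pvWordEnd]; simp [h]
    rw [e]
    conv_lhs => rw [tokenize_sqlAltGo.eq_def]
    conv_rhs => rw [tokenize_sqlAltGo.eq_def]
    simp [h, pv_slice_clamp cs start i (by omega)]
termination_by cs.length - i

theorem altGo_num (cs : List Char) (i start : Nat) :
    tokenize_sqlAltGo cs i start .number =
      String.ofList (PySem.List.slice cs (some (start : Int)) (some ((pvNumEnd cs i : Nat) : Int))) ::
        tokenize_sqlAltGo cs (pvNumEnd cs i) start .start := by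
  by_cases h : i < cs.length
  · by_cases hc : PySem.Chars.isdigit (cs[i]'h) = true
    · have e : pvNumEnd cs i = pvNumEnd cs (i + 1) := by rw [pvNumEnd]; simp [h, hc]
      have eL : tokenize_sqlAltGo cs i start .number = tokenize_sqlAltGo cs (i + 1) start .number := by
        conv_lhs => rw [tokenize_sqlAltGo.eq_def]
        simp [h, hc]
      rw [eL, e]
      exact altGo_num cs (i + 1) start
    · have e : pvNumEnd cs i = i := by rw [pvNumEnd]; simp [h, hc]
      rw [e]
      conv_lhs => rw [tokenize_sqlAltGo.eq_def]
      simp [h, hc]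
  · have e : pvNumEnd cs i = i := by rw [pvNumEnd]; simp [h]
    rw [e]
    rw [tokenize_sqlAltGo.eq_def]
    conv_rhs => rw [tokenize_sqlAltGo.eq_def]
    simp [h, pv_slice_clamp cs start i (by omega)]
termination_by cs.length - i

theorem altGo_skip (cs : List Char) (i start : Nat) :
    tokenize_sqlAltGo cs i start .start = tokenize_sqlAltGo cs (pvSkipWS cs i) start .start := by
  by_cases h : i < cs.length
  · by_cases hs : PySem.Chars.isspace (cs[i]'h) = true
    · have e : pvSkipWS cs i = pvSkipWS cs (i + 1) := by rw [pvSkipWS]; simp [h, hs]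
      have eL : tokenize_sqlAltGo cs i start .start = tokenize_sqlAltGo cs (i + 1) start .start := by
        conv_lhs => rw [tokenize_sqlAltGo.eq_def]
        simp [h, hs]
      rw [eL, e]
      exact altGo_skip cs (i + 1) start
    · have e : pvSkipWS cs i = i := by rw [pvSkipWS]; simp [h, hs]
      rw [e]
  · have e : pvSkipWS cs i = i := by rw [pvSkipWS]; simp [h]
    rw [e]
termination_by cs.length - i

theorem altGo_start_irrel (cs : List Char) (i s1 s2 : Nat) :
    tokenize_sqlAltGo cs i s1 .start = tokenize_sqlAltGo cs i s2 .start := by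
  by_cases h : i < cs.length
  · conv_lhs => rw [tokenize_sqlAltGo.eq_def]
    conv_rhs => rw [tokenize_sqlAltGo.eq_def]
    simp only [dif_pos h]
    split_ifs
    · exact altGo_start_irrel cs (i + 1) s1 s2
    · rfl
    · rfl
    · exact congrArg _ (altGo_start_irrel cs (i + 2) s1 s2)
    · exact congrArg _ (altGo_start_irrel cs (i + 1) s1 s2)
    · rfl
  · conv_lhs => rw [tokenize_sqlAltGo.eq_def]
    conv_rhs => rw [tokenize_sqlAltGo.eq_def]
    simp only [dif_neg h]
termination_by cs.length - i

theorem pv_main (cs : List Char) (r start : Nat) :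
    tokenize_sqlGo cs r = tokenize_sqlAltGo cs r start .start := by
  by_cases hr : r < cs.length
  · rw [altGo_skip cs r start]
    conv_lhs => rw [tokenize_sqlGo.eq_def]
    simp only [dif_pos hr]
    by_cases h1 : pvSkipWS cs r < cs.length
    · have hs : PySem.Chars.isspace (cs[pvSkipWS cs r]'h1) = false := pvSkipWS_not_space cs r h1
      simp only [dif_pos h1]
      by_cases hw : (PySem.Chars.isalpha (cs[pvSkipWS cs r]'h1) || (cs[pvSkipWS cs r]'h1 == '_')) = true
      · simp only [if_pos hw]
        conv_rhs => rw [tokenize_sqlAltGo.eq_def]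
        simp only [dif_pos h1, hs]
        simp only [Bool.false_eq_true, if_false, if_pos hw]
        rw [altGo_word cs (pvSkipWS cs r + 1) (pvSkipWS cs r)]
        exact congrArg _ (pv_main cs (pvWordEnd cs (pvSkipWS cs r + 1)) (pvSkipWS cs r))
      · simp only [if_neg hw]
        by_cases hn : PySem.Chars.isdigit (cs[pvSkipWS cs r]'h1) = true
        · simp only [if_pos hn]
          conv_rhs => rw [tokenize_sqlAltGo.eq_def]
          simp only [dif_pos h1, hs]
          simp only [Bool.false_eq_true, if_false, if_neg hw, if_pos hn]
          rw [altGo_num cs (pvSkipWS cs r + 1) (pvSkipWS cs r)]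
          exact congrArg _ (pv_main cs (pvNumEnd cs (pvSkipWS cs r + 1)) (pvSkipWS cs r))
        · simp only [if_neg hn]
          have hd : cs.drop (pvSkipWS cs r) =
              (cs[pvSkipWS cs r]'h1) :: cs.drop (pvSkipWS cs r + 1) :=
            List.drop_eq_getElem_cons h1
          have hfind := spec_find (cs[pvSkipWS cs r]'h1) (cs.drop (pvSkipWS cs r + 1))
          have hslice : PySem.List.slice cs (some ((pvSkipWS cs r : Nat) : Int))
                (some ((pvSkipWS cs r + 2 : Nat) : Int)) =
              ((cs[pvSkipWS cs r]'h1) :: cs.drop (pvSkipWS cs r + 1)).take 2 := by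
            rw [PySem.List.slice_natCast, ← hd]
            congr 1
            omega
          conv_rhs => rw [tokenize_sqlAltGo.eq_def]
          simp only [dif_pos h1, hs]
          simp only [Bool.false_eq_true, if_false, if_neg hw, if_neg hn]
          by_cases h2 : pvTwoChar.contains
              (((cs[pvSkipWS cs r]'h1) :: cs.drop (pvSkipWS cs r + 1)).take 2) = true
          · have hf2 : pvSpecials.find?
                  (fun tok => PySem.Chars.startswith (cs.drop (pvSkipWS cs r)) tok) =
                some (((cs[pvSkipWS cs r]'h1) :: cs.drop (pvSkipWS cs r + 1)).take 2) := by
              rw [hd, hfind, if_pos h2]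
            have hany : pvSpecials.any
                (fun tok => PySem.Chars.startswith (cs.drop (pvSkipWS cs r)) tok) = true :=
              List.any_eq_true.mpr
                ⟨_, List.mem_of_find?_eq_some hf2, List.find?_some hf2⟩
            rw [if_pos hany]
            have hlen : (((cs[pvSkipWS cs r]'h1) :: cs.drop (pvSkipWS cs r + 1)).take 2).length = 2 := by
              rw [← hd]
              rcases (by simpa [pvTwoChar] using h2 :
                  _ = ['<','>'] ∨ _ = ['<','='] ∨ _ = ['>','='] ∨ _ = ['!','=']) with
                h|h|h|h <;> rw [h] <;> rfl
            rw [if_pos (show pvTwoChar.contains (PySem.List.slice cs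
                (some ((pvSkipWS cs r : Nat) : Int)) (some ((pvSkipWS cs r + 2 : Nat) : Int))) = true by
              rw [hslice]; exact h2)]
            split
            · rename_i tok hfx
              rw [hf2] at hfx
              cases hfx
              rw [hlen]
              exact congrArg _ (pv_main cs (pvSkipWS cs r + 2) start)
            · rename_i hfx
              rw [hf2] at hfx
              cases hfx
          · by_cases h3 : pvOneChar.contains (cs[pvSkipWS cs r]'h1) = true
            · have hf2 : pvSpecials.find?
                    (fun tok => PySem.Chars.startswith (cs.drop (pvSkipWS cs r)) tok) =
                  some [cs[pvSkipWS cs r]'h1] := by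
                rw [hd, hfind, if_neg h2, if_pos h3]
              have hany : pvSpecials.any
                  (fun tok => PySem.Chars.startswith (cs.drop (pvSkipWS cs r)) tok) = true :=
                List.any_eq_true.mpr
                  ⟨_, List.mem_of_find?_eq_some hf2, List.find?_some hf2⟩
              rw [if_pos hany]
              rw [if_neg (show ¬ pvTwoChar.contains (PySem.List.slice cs
                  (some ((pvSkipWS cs r : Nat) : Int)) (some ((pvSkipWS cs r + 2 : Nat) : Int))) = true by
                rw [hslice]; exact h2)]
              rw [if_pos h3]
              split
              · rename_i tok hfx
                rw [hf2] at hfx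
                cases hfx
                have htok1 : PySem.List.slice cs (some ((pvSkipWS cs r : Nat) : Int))
                    (some ((pvSkipWS cs r : Int) + 1)) = [cs[pvSkipWS cs r]'h1] := by
                  rw [show ((pvSkipWS cs r : Int) + 1) = ((pvSkipWS cs r + 1 : Nat) : Int) by push_cast; ring]
                  rw [PySem.List.slice_natCast, hd, Nat.add_sub_cancel_left]
                  simp only [List.take_succ_cons, List.take_zero]
                norm_num
                exact ⟨congrArg _ htok1, pv_main cs (pvSkipWS cs r + 1) start⟩
              · rename_i hfx
                rw [hf2] at hfx
                cases hfx
            · have hf2 : pvSpecials.find?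
                    (fun tok => PySem.Chars.startswith (cs.drop (pvSkipWS cs r)) tok) = none := by
                rw [hd, hfind, if_neg h2, if_neg h3]
              have hany : pvSpecials.any
                  (fun tok => PySem.Chars.startswith (cs.drop (pvSkipWS cs r)) tok) = false := by
                rw [List.any_eq_false]
                intro x hx
                simpa using List.find?_eq_none.mp hf2 x hx
              rw [if_neg (by simp [hany])]
              rw [if_neg (show ¬ pvTwoChar.contains (PySem.List.slice cs
                  (some ((pvSkipWS cs r : Nat) : Int)) (some ((pvSkipWS cs r + 2 : Nat) : Int))) = true by
                rw [hslice]; exact h2)]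
              rw [if_neg h3]
    · simp only [dif_neg h1]
      conv_rhs => rw [tokenize_sqlAltGo.eq_def]
      simp only [dif_neg h1]
  · conv_lhs => rw [tokenize_sqlGo.eq_def]
    conv_rhs => rw [tokenize_sqlAltGo.eq_def]
    simp only [dif_neg hr]
termination_by cs.length - r
decreasing_by
  all_goals
    (have ha := pvSkipWS_le cs r
     first
       | (have hb := pvWordEnd_le cs (pvSkipWS cs r + 1); omega)
       | (have hb := pvNumEnd_le cs (pvSkipWS cs r + 1); omega))

-- ===== VERDICT (by name: the statement is the Claim_ definition above) =====
theorem tokenize_sql_spec : Claim_equal_tokenize_sql := by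
  intro text _ _
  unfold Spec_tokenize_sql tokenize_sql tokenize_sql_alt
  exact pv_main text.toList 0 0
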